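-- pv_equiv track=rewrite | github.com/shc2025/maxcalw | crsi_calculator.py | streak_days
-- ===== SOURCE A (Python) =====
-- def streak_days(closes):
--     """连续趋势天数: 上涨=+N, 下跌=-N"""
--     if len(closes) < 2:
--         return [0] * len(closes)
--     s = [0]
--     for i in range(1, len(closes)):
--         if closes[i] > closes[i-1]:
--             s.append(1 if s[-1] <= 0 else s[-1] + 1)
--         elif closes[i] < closes[i-1]:
--             s.append(-1 if s[-1] >= 0 else s[-1] - 1)
--         else:
--             s.append(0)
--     return s
-- ===== SOURCE B (Python) =====
-- def streak_days(closes):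
--     """连续趋势天数: 上涨=+N, 下跌=-N"""
--     if len(closes) < 2:
--         return [0] * len(closes)
--     # classify each adjacent pair, then expand runs of equal direction
--     dirs = [1 if b > a else (-1 if b < a else 0) for a, b in zip(closes, closes[1:])]
--     out = [0]
--     i = 0
--     n = len(dirs)
--     while i < n:
--         d = dirs[i]
--         j = i + 1
--         while j < n and dirs[j] == d:
--             j += 1
--         k = j - i
--         out += [0] * k if d == 0 else [d * t for t in range(1, k + 1)]
--         i = j
--     return out
-- ===== Notes on version B (the rewrite author's own statement) =====
-- stated objective: alternative
-- what changed: Replaces A's running-accumulator pass (each step inspects s[-1]) with a classify-then-group decomposition: build a +1/-1/0 direction list from adjacent pairs, then emit each maximal run of equal direction at once (d*1..d*k, or k zeros).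
import Mathlib
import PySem

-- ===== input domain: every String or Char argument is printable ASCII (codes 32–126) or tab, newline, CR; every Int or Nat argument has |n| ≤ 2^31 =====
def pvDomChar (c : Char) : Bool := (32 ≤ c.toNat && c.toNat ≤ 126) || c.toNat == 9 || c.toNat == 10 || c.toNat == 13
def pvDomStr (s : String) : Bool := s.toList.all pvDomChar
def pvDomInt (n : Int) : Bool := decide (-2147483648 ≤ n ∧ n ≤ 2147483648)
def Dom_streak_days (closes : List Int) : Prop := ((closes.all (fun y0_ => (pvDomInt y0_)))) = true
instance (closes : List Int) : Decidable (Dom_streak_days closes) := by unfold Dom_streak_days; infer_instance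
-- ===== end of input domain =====

-- B replaces A's running-accumulator pass with a classify-then-group-runs decomposition (alternative, same cost).


-- ===== PORT A =====
-- the for-loop over i = 1 .. len-1: `prev` is closes[i-1], `c` is closes[i],
-- `s[-1]` is read as s.getLast?.getD 0 (s is never empty), s.append v is s ++ [v]
def streakA_loop (prev : Int) (rest : List Int) (s : List Int) : List Int :=
  match rest with
  | [] => s
  | c :: cs =>
    let last := s.getLast?.getD 0
    if prev < c then streakA_loop c cs (s ++ [if last ≤ 0 then 1 else last + 1])
    else if c < prev then streakA_loop c cs (s ++ [if last ≥ 0 then -1 else last - 1])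
    else streakA_loop c cs (s ++ [0])

def streak_days (closes : List Int) : List Int :=
  if closes.length < 2 then List.replicate closes.length 0
  else match closes with
    | [] => []
    | c :: cs => streakA_loop c cs [0]

-- ===== PORT B =====
-- inner while: k = 1 + length of the prefix of rest equal to d; dirs[k:] = dropWhile
def emitRuns : List Int → List Int
  | [] => []
  | d :: rest =>
    (if d = 0 then List.replicate (1 + (rest.takeWhile (· = d)).length) (0 : Int)
     else (List.range' 1 (1 + (rest.takeWhile (· = d)).length)).map (fun (t : Nat) => d * (t : Int)))
      ++ emitRuns (rest.dropWhile (· = d))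
termination_by l => l.length
decreasing_by simpa using Nat.lt_succ_of_le (List.length_dropWhile_le _ _)

def streak_days_alt (closes : List Int) : List Int :=
  if closes.length < 2 then List.replicate closes.length 0
  else
    0 :: emitRuns ((closes.zip (PySem.List.slice closes (some 1) none)).map
          (fun p => if p.1 < p.2 then (1 : Int) else if p.2 < p.1 then -1 else 0))

-- ===== PRECONDITION & SPEC =====
def Spec_streak_days (closes : List Int) (out : List Int) : Prop := out = streak_days_alt closes
instance (closes : List Int) (out : List Int) : Decidable (Spec_streak_days closes out) := by unfold Spec_streak_days; infer_instance

-- ===== CLAIM (what is proved, stated in full; the proofs are below) =====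
def Claim_equal_streak_days : Prop := ∀ (closes : List Int), Dom_streak_days closes → Spec_streak_days closes (streak_days closes)

-- ===== LEMMAS AND PROOFS =====

-- direction of one adjacent pair, and the direction list of prev :: rest
def dirOf (a b : Int) : Int := if a < b then 1 else if b < a then -1 else 0

def dirList (prev : Int) : List Int → List Int
  | [] => []
  | c :: cs => dirOf prev c :: dirList c cs

-- A's step as a function of the previous streak value and the direction
def stepS (last d : Int) : Int :=
  if d = 1 then (if last ≤ 0 then 1 else last + 1)
  else if d = -1 then (if last ≥ 0 then -1 else last - 1)
  else 0

def emitCont (last : Int) : List Int → List Int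
  | [] => []
  | d :: ds => stepS last d :: emitCont (stepS last d) ds

theorem dirList_mem (prev : Int) (l : List Int) :
    ∀ x ∈ dirList prev l, x = 1 ∨ x = -1 ∨ x = 0 := by
  induction l generalizing prev with
  | nil => simp [dirList]
  | cons c cs ih =>
    intro x hx
    simp only [dirList, List.mem_cons] at hx
    rcases hx with h | h
    · subst h; unfold dirOf; split_ifs <;> simp
    · exact ih c x h

theorem streakA_loop_eq (rest : List Int) :
    ∀ (prev : Int) (s0 : List Int) (last : Int),
      streakA_loop prev rest (s0 ++ [last]) =
        s0 ++ [last] ++ emitCont last (dirList prev rest) := by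
  induction rest with
  | nil => intro prev s0 last; simp [streakA_loop, dirList, emitCont]
  | cons c cs ih =>
    intro prev s0 last
    have hlast : ((s0 ++ [last]).getLast?).getD 0 = last := by
      rw [List.getLast?_concat]; rfl
    rcases lt_trichotomy prev c with h | h | h
    · have step1 : streakA_loop prev (c :: cs) (s0 ++ [last])
           = streakA_loop c cs ((s0 ++ [last]) ++ [if last ≤ 0 then 1 else last + 1]) := by
        simp only [streakA_loop, hlast]; rw [if_pos h]
      rw [step1, ih]
      have e1 : dirOf prev c = 1 := by simp [dirOf, h]
      simp [dirList, e1, emitCont, stepS]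
    · subst h
      have step1 : streakA_loop prev (prev :: cs) (s0 ++ [last])
           = streakA_loop prev cs ((s0 ++ [last]) ++ [(0 : Int)]) := by
        simp [streakA_loop]
      rw [step1, ih]
      have e1 : dirOf prev prev = 0 := by simp [dirOf]
      simp [dirList, e1, emitCont, stepS]
    · have step1 : streakA_loop prev (c :: cs) (s0 ++ [last])
           = streakA_loop c cs ((s0 ++ [last]) ++ [if last ≥ 0 then -1 else last - 1]) := by
        simp only [streakA_loop, hlast]
        rw [if_neg (by omega), if_pos h]
      rw [step1, ih]
      have e1 : dirOf prev c = -1 := by simp [dirOf, h, show ¬ prev < c by omega]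
      simp [dirList, e1, emitCont, stepS]

theorem takeWhile_eq_replicate (l : List Int) (d : Int) :
    l.takeWhile (· = d) = List.replicate (l.takeWhile (· = d)).length d := by
  induction l with
  | nil => rfl
  | cons x xs ih =>
    by_cases h : x = d
    · subst h; simpa [List.takeWhile_cons, List.replicate_succ] using ih
    · simp [h]

theorem emitCont_zero_run (k : Nat) (r : List Int) :
    emitCont 0 (List.replicate k (0 : Int) ++ r) = List.replicate k (0 : Int) ++ emitCont 0 r := by
  induction k with
  | zero => simp
  | succ k ih => simp [List.replicate_succ, emitCont, stepS, ih]

theorem emitCont_pos_run (d : Int) (hd : d = 1 ∨ d = -1) (k : Nat) :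
    ∀ (j : Nat) (r : List Int),
    emitCont (d * ((j : Int) + 1)) (List.replicate k d ++ r)
      = (List.range' (j + 2) k).map (fun (t : Nat) => d * (t : Int))
          ++ emitCont (d * (((j + 1 + k : Nat) : Int))) r := by
  induction k with
  | zero => intro j r; simp
  | succ k ih =>
    intro j r
    have hstep : stepS (d * ((j : Int) + 1)) d = d * ((j : Int) + 2) := by
      have hj : (0 : Int) ≤ (j : Int) := Int.natCast_nonneg j
      rcases hd with h | h <;> subst h <;> simp [stepS] <;> omega
    have h2 : ((j : Int) + 2) = (((j + 1 : Nat) : Int)) + 1 := by push_cast; ring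
    calc emitCont (d * ((j : Int) + 1)) (List.replicate (k + 1) d ++ r)
        = d * ((j : Int) + 2)
            :: emitCont (d * ((((j + 1 : Nat)) : Int) + 1)) (List.replicate k d ++ r) := by
          rw [List.replicate_succ, List.cons_append, emitCont, hstep, ← h2]
      _ = d * ((j : Int) + 2)
            :: ((List.range' (j + 1 + 2) k).map (fun (t : Nat) => d * (t : Int))
                ++ emitCont (d * (((j + 1 + 1 + k : Nat)) : Int)) r) := by
          rw [ih (j + 1) r]
      _ = (List.range' (j + 2) (k + 1)).map (fun (t : Nat) => d * (t : Int))
            ++ emitCont (d * (((j + 1 + (k + 1) : Nat)) : Int)) r := by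
          rw [List.range'_succ, List.map_cons, List.cons_append,
            show j + 1 + (k + 1) = j + 1 + 1 + k from by omega,
            show j + 2 + 1 = j + 1 + 2 from by omega]
          push_cast
          ring_nf

theorem emitCont_eq_emitRuns (n : Nat) : ∀ (ds : List Int), ds.length ≤ n →
    (∀ x ∈ ds, x = 1 ∨ x = -1 ∨ x = 0) →
    ∀ last : Int, (∀ d, ds.head? = some d → (d = 1 → last ≤ 0) ∧ (d = -1 → 0 ≤ last)) →
    emitCont last ds = emitRuns ds := by
  induction n with
  | zero =>
    intro ds h _ last _
    have : ds = [] := List.length_eq_zero_iff.mp (Nat.le_zero.mp h)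
    subst this; simp [emitCont, emitRuns]
  | succ n ih =>
    intro ds hlen hmem last hC
    match ds with
    | [] => simp [emitCont, emitRuns]
    | d :: rest =>
      have hC' := hC d rfl
      have hsplit : rest.takeWhile (· = d) ++ rest.dropWhile (· = d) = rest :=
        List.takeWhile_append_dropWhile
      set K := (rest.takeWhile (· = d)).length with hK
      have htake : rest.takeWhile (· = d) = List.replicate K d := takeWhile_eq_replicate rest d
      set r := rest.dropWhile (· = d) with hr
      have hrlen : r.length ≤ n := by
        have h1 : r.length ≤ rest.length := List.length_dropWhile_le _ _
        have h2 : rest.length + 1 ≤ n + 1 := by simpa using hlen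
        omega
      have hrmem : ∀ x ∈ r, x = 1 ∨ x = -1 ∨ x = 0 := by
        intro x hx
        exact hmem x (List.mem_cons_of_mem d ((List.dropWhile_sublist _).mem hx))
      have hrhead : ∀ d', r.head? = some d' → d' ≠ d := by
        intro d' hd'
        have := List.head?_dropWhile_not (fun x => decide (x = d)) rest
        rw [← hr, hd'] at this
        simpa using this
      have hrest : rest = List.replicate K d ++ r := by rw [← htake, hsplit]
      rcases hmem d (List.mem_cons_self) with h1 | h1 | h1
      · -- d = 1 or d = -1 : increasing/decreasing run
        subst h1
        have hfirst : stepS last 1 = 1 := by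
          have := hC'.1 rfl; simp [stepS]; omega
        have hrC : ∀ d', r.head? = some d' →
            (d' = 1 → (1 : Int) * ((0 : Int) + 1 + (K : Int)) ≤ 0) ∧
            (d' = -1 → 0 ≤ (1 : Int) * ((0 : Int) + 1 + (K : Int))) := by
          intro d' hd'
          constructor
          · intro h; exact absurd h (hrhead d' hd')
          · intro _; have := Int.natCast_nonneg K; omega
        have hrun := emitCont_pos_run 1 (Or.inl rfl) K 0 r
        have hrec : emitCont ((1 : Int) * (((0 + 1 + K : Nat) : Int))) r = emitRuns r := by
          apply ih r hrlen hrmem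
          intro d' hd'
          have := hrC d' hd'
          push_cast
          push_cast at this
          exact this
        calc emitCont last (1 :: rest)
            = 1 :: emitCont ((1:Int) * (((0:Nat):Int) + 1)) (List.replicate K 1 ++ r) := by
              simp only [emitCont, hfirst, hrest]; norm_num
          _ = 1 :: ((List.range' 2 K).map (fun (t : Nat) => (1:Int) * (t : Int))
                ++ emitCont ((1:Int) * (((0 + 1 + K : Nat) : Int))) r) := by rw [hrun]
          _ = emitRuns (1 :: rest) := by
              rw [hrec]
              show _ = emitRuns (1 :: rest)
              rw [emitRuns]
              rw [if_neg (by norm_num), ← hK,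
                show 1 + K = K + 1 from Nat.add_comm 1 K, List.range'_succ, ← hr]
              simp
      · subst h1
        have hfirst : stepS last (-1) = -1 := by
          have := hC'.2 rfl; simp [stepS]; omega
        have hrun := emitCont_pos_run (-1) (Or.inr rfl) K 0 r
        have hrec : emitCont ((-1 : Int) * (((0 + 1 + K : Nat) : Int))) r = emitRuns r := by
          apply ih r hrlen hrmem
          intro d' hd'
          constructor
          · intro _; have := Int.natCast_nonneg K; push_cast; omega
          · intro h; exact absurd h (hrhead d' hd')
        calc emitCont last (-1 :: rest)
            = -1 :: emitCont ((-1:Int) * (((0:Nat):Int) + 1)) (List.replicate K (-1) ++ r) := by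
              simp only [emitCont, hfirst, hrest]; norm_num
          _ = -1 :: ((List.range' 2 K).map (fun (t : Nat) => (-1:Int) * (t : Int))
                ++ emitCont ((-1:Int) * (((0 + 1 + K : Nat) : Int))) r) := by rw [hrun]
          _ = emitRuns (-1 :: rest) := by
              rw [hrec]
              show _ = emitRuns (-1 :: rest)
              rw [emitRuns]
              rw [if_neg (by norm_num), ← hK,
                show 1 + K = K + 1 from Nat.add_comm 1 K, List.range'_succ, ← hr]
              simp
      · -- flat run
        subst h1
        have hfirst : stepS last 0 = 0 := by simp [stepS]
        have hrec : emitCont 0 r = emitRuns r := by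
          apply ih r hrlen hrmem
          intro d' _
          constructor <;> intro _ <;> omega
        calc emitCont last (0 :: rest)
            = 0 :: emitCont 0 (List.replicate K 0 ++ r) := by
              simp only [emitCont, hfirst, hrest]
          _ = 0 :: (List.replicate K 0 ++ emitCont 0 r) := by rw [emitCont_zero_run]
          _ = emitRuns (0 :: rest) := by
              rw [hrec, emitRuns]
              rw [if_pos rfl, ← hK, ← hr,
                show 1 + K = K + 1 from Nat.add_comm 1 K, List.replicate_succ]
              simp

theorem zip_map_eq_dirList (cs : List Int) : ∀ c : Int,
    ((c :: cs).zip cs).map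
      (fun p => if p.1 < p.2 then (1 : Int) else if p.2 < p.1 then -1 else 0)
      = dirList c cs := by
  induction cs with
  | nil => intro c; rfl
  | cons c' cs' ih =>
    intro c
    simp only [List.zip_cons_cons, List.map_cons, dirList, ih c']
    rfl

theorem dirsOf_eq (c : Int) (cs : List Int) :
    ((c :: cs).zip (PySem.List.slice (c :: cs) (some 1) none)).map
      (fun p => if p.1 < p.2 then (1 : Int) else if p.2 < p.1 then -1 else 0)
      = dirList c cs := by
  rw [PySem.List.slice_from_one]
  exact zip_map_eq_dirList cs c

-- ===== VERDICT (by name: the statement is the Claim_ definition above) =====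
theorem streak_days_spec : Claim_equal_streak_days := by
  intro closes _
  unfold Spec_streak_days streak_days streak_days_alt
  split
  · rfl
  · match closes with
    | [] => simp at *
    | c :: cs =>
      rw [dirsOf_eq]
      show streakA_loop c cs [0] = 0 :: emitRuns (dirList c cs)
      have h := streakA_loop_eq cs c [] 0
      simp only [List.nil_append] at h
      rw [h]
      rw [emitCont_eq_emitRuns (dirList c cs).length _ le_rfl (dirList_mem c cs) 0
        (by intro d _; constructor <;> intro _ <;> omega)]
      rfl
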